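-- pv_equiv track=rewrite | github.com/pmfcommunity/Programiranje-1 | Dnevni Zadaci/36_dnevni_zadatak.py | zbir_cifara
-- ===== SOURCE A (Python) =====
-- def zbir_cifara(a):
--     cifre = [0, 1, 2, 3, 4, 5, 6, 7, 8, 9]
--     cifre_broja = []
--     while a != 0:
--         cifra = a % 10
--         cifre_broja.append(cifra)
--         a //= 10
--     suma = 0
--     for cifra in cifre:
--         if cifra not in cifre_broja:
--             suma += cifra
--     return suma
-- ===== SOURCE B (Python) =====
-- def zbir_cifara(a):
--     prisutne = set()
--     while a != 0:
--         prisutne.add(a % 10)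
--         a //= 10
--     return 45 - sum(prisutne)
-- ===== Notes on version B (the rewrite author's own statement) =====
-- stated objective: simpler
-- what changed: B keeps A's digit-extraction loop but records present digits in a set and returns the answer by complement (45 minus the sum of present digits), eliminating A's second pass over the candidate digits 0-9 with its inner list-membership scan. Pre_ requires 0 <= a, since for negative a both programs' while-loops never terminate (a //= 10 converges to -1).
import Mathlib
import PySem

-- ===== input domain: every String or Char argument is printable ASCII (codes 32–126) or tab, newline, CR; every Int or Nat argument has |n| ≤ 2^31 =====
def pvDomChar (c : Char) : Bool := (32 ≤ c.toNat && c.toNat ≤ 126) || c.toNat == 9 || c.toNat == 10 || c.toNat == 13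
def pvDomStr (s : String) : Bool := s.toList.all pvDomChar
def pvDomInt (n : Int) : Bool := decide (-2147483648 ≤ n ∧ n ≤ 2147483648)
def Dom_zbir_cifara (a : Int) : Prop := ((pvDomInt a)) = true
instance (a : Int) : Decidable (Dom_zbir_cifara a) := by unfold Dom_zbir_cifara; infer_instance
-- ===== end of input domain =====

-- B record the digits in a set and returns 45 minus the sum of present digits, instead of
-- A's second pass over the candidates 0-9 with an inner membership scan of the digit list.

-- ===== PORT A =====
-- Python's loop runs 'while a != 0'; for a < 0 it never terminates ('a //= 10' converges to -1),
-- and those inputs are excluded by Pre_. On 0 ≤ a the guard '0 < a' coincides with 'a ≠ 0'.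
def pvDigitsA (a : Int) : List Int :=
  if h : 0 < a then PySem.Int.mod a 10 :: pvDigitsA (PySem.Int.floordiv a 10) else []
termination_by a.toNat
decreasing_by
  have h10 : (0:Int) < 10 := by norm_num
  rw [PySem.Int.floordiv_eq_ediv_of_pos h10]
  omega

def zbir_cifara (a : Int) : Int :=
  let cifre : List Int := [0, 1, 2, 3, 4, 5, 6, 7, 8, 9]
  let cifre_broja := pvDigitsA a
  cifre.foldl (fun suma cifra => if cifra ∈ cifre_broja then suma else suma + cifra) 0

-- ===== PORT B =====
-- same termination note as for port A: the Python loop is 'while a != 0', nonterminating for a < 0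
def pvPrisutneB (a : Int) (s : PySem.Set Int) : PySem.Set Int :=
  if h : 0 < a then pvPrisutneB (PySem.Int.floordiv a 10) (PySem.Set.add s (PySem.Int.mod a 10)) else s
termination_by a.toNat
decreasing_by
  have h10 : (0:Int) < 10 := by norm_num
  rw [PySem.Int.floordiv_eq_ediv_of_pos h10]
  omega

def zbir_cifara_alt (a : Int) : Int :=
  45 - (pvPrisutneB a PySem.Set.empty).sum

-- ===== PRECONDITION & SPEC =====
-- Pre_ excludes a < 0: there Python's while-loop (in both A and B) never terminates.
def Pre_zbir_cifara (a : Int) : Prop := 0 ≤ a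
instance (a : Int) : Decidable (Pre_zbir_cifara a) := by unfold Pre_zbir_cifara; infer_instance
def pvWitness_zbir_cifara : Int := (2025)

def Spec_zbir_cifara (a : Int) (out : Int) : Prop := out = zbir_cifara_alt a
instance (a : Int) (out : Int) : Decidable (Spec_zbir_cifara a out) := by unfold Spec_zbir_cifara; infer_instance

-- ===== CLAIM (what is proved, stated in full; the proofs are below) =====
def Claim_equal_zbir_cifara : Prop := ∀ (a : Int), Dom_zbir_cifara a → Pre_zbir_cifara a → Spec_zbir_cifara a (zbir_cifara a)

-- ===== LEMMAS AND PROOFS =====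

-- every extracted digit lies in [0, 10)
theorem pvDigitsA_mem_bound (a : Int) : ∀ x ∈ pvDigitsA a, 0 ≤ x ∧ x < 10 := by
  induction a using pvDigitsA.induct with
  | case1 a h ih =>
      rw [pvDigitsA, dif_pos h]
      intro x hx
      rcases List.mem_cons.mp hx with rfl | hx
      · rw [PySem.Int.mod_eq_emod_of_pos (by norm_num)]
        constructor
        · exact Int.emod_nonneg a (by norm_num)
        · exact Int.emod_lt_of_pos a (by norm_num)
      · exact ih x hx
  | case2 a h =>
      rw [pvDigitsA, dif_neg h]
      intro x hx; cases hx

-- B's loop folds Set.add over A's digit list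
theorem pvPrisutneB_eq (a : Int) (s : PySem.Set Int) :
    pvPrisutneB a s = (pvDigitsA a).foldl PySem.Set.add s := by
  induction a, s using pvPrisutneB.induct with
  | case1 a s h ih =>
      rw [pvPrisutneB, dif_pos h, pvDigitsA, dif_pos h, List.foldl_cons, ih]
  | case2 a s h =>
      rw [pvPrisutneB, dif_neg h, pvDigitsA, dif_neg h, List.foldl_nil]

-- A's skipping fold over any candidate list, as a closed form
theorem fold_skip (cs ds : List Int) (s : Int) :
    cs.foldl (fun suma c => if c ∈ ds then suma else suma + c) s
      = s + cs.sum - (cs.filter (fun c => decide (c ∈ ds))).sum := by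
  induction cs generalizing s with
  | nil => simp
  | cons c cs ih =>
      simp only [List.foldl_cons, List.filter_cons, ih]
      by_cases h : c ∈ ds <;> simp [h] <;> ring

theorem main_eq (a : Int) (_ : 0 ≤ a) : zbir_cifara a = zbir_cifara_alt a := by
  show ([0,1,2,3,4,5,6,7,8,9] : List Int).foldl
      (fun suma cifra => if cifra ∈ pvDigitsA a then suma else suma + cifra) 0
      = 45 - (pvPrisutneB a PySem.Set.empty).sum
  rw [pvPrisutneB_eq]
  have hfold : (pvDigitsA a).foldl PySem.Set.add PySem.Set.empty = PySem.Set.ofList (pvDigitsA a) :=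
    (PySem.Set.ofList_eq_foldl (pvDigitsA a)).symm
  rw [hfold]
  set ds := pvDigitsA a with hds
  rw [fold_skip]
  have hperm : ([0,1,2,3,4,5,6,7,8,9] : List Int).filter (fun c => decide (c ∈ ds))
      |> List.Perm <| PySem.Set.ofList ds := by
    rw [List.perm_ext_iff_of_nodup (List.Nodup.filter _ (by decide)) (PySem.Set.nodup_ofList ds)]
    intro c
    simp only [List.mem_filter, decide_eq_true_eq, PySem.Set.mem_ofList]
    constructor
    · rintro ⟨-, h⟩; exact h
    · intro h
      refine ⟨?_, h⟩
      have hb := pvDigitsA_mem_bound a c h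
      simp only [List.mem_cons, List.not_mem_nil, or_false]
      omega
  rw [hperm.sum_eq]
  norm_num

-- ===== VERDICT (by name: the statement is the Claim_ definition above) =====
theorem zbir_cifara_spec : Claim_equal_zbir_cifara := by
  intro a _ hpre
  unfold Spec_zbir_cifara
  exact main_eq a hpre
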